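-- pv_equiv track=rewrite | github.com/davidam/damegender | src/damegender/app/dame_utils.py | drop_white_space_around
-- ===== SOURCE A (Python) =====
-- import unicodedata
--
-- def drop_white_space_around(s):
--     # deleting white spaces around a string
--     aux = ""
--     arr = unicodedata.normalize('NFD', str(s))
--     i = 0
--     j = len(arr)
--     while (i != j):
--         if (arr[i] == " "):
--             aux = ""
--         else:
--             aux = aux + arr[i]
--             j = i + 1
--         i = i + 1
--     j = -1
--     while (len(arr) > i) and (i != j):
--         if (arr[i] != " "):
--             aux = aux + arr[i]
--         elif ((arr[i] == " ") and (len(arr) == (i+1))):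
--             j = i+1
--         elif ((arr[i] == " ") and (arr[i+1].isalpha())):
--             aux = aux + arr[i]
--         else:
--             j = i+1
--         i = i+1
--     return aux
-- ===== SOURCE B (Python) =====
-- import unicodedata
--
-- def drop_white_space_around(s):
--     t = unicodedata.normalize('NFD', str(s)).lstrip(' ')
--     if t == '':
--         return t
--     for i in range(1, len(t)):
--         if t[i] == ' ' and not (i + 1 < len(t) and t[i + 1].isalpha()):
--             return t[:i]
--     return t
-- ===== Notes on version B (the rewrite author's own statement) =====
-- stated objective: faster
-- what changed: Replaces A's two index/sentinel while-loops with character-by-character string accumulation (reset-on-space trick, quadratic string concatenation) by stripping leading spaces and a single scan for the first cut index, returning one slice.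
import Mathlib
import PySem

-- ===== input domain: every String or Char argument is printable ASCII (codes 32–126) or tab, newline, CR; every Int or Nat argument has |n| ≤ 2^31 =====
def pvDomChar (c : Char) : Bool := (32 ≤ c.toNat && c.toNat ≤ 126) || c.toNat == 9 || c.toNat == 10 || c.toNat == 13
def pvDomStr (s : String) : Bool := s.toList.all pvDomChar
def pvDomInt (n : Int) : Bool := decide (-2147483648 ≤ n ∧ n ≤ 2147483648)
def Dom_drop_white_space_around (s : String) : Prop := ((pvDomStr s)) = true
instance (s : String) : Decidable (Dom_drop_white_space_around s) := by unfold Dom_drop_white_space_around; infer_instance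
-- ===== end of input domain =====

-- B replaces A's two index/sentinel while-loops with character-by-character string accumulation
-- by stripping leading spaces and one cut-index scan returning a single slice (measured faster:
-- it avoids A's quadratic string concatenation).
-- unicodedata.normalize('NFD', str(s)) is the identity on the ASCII domain; both ports omit it (exact on Dom).

-- ===== PORT A =====
-- first while loop: aux reset to "" on ' ', j := i+1 on any other char; returns (aux, i)
def pvLoop1A (fuel : Nat) (arr aux : List Char) (i j : Nat) : List Char × Nat :=
  match fuel with
  | 0 => (aux, i)
  | fuel + 1 =>
    if i ≠ j then
      if arr.getD i ' ' = ' ' then pvLoop1A fuel arr [] (i + 1) j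
      else pvLoop1A fuel arr (aux ++ [arr.getD i ' ']) (i + 1) (i + 1)
    else (aux, i)

-- second while loop: j : Int, sentinel -1, loop stopped by setting j := i+1
def pvLoop2A (fuel : Nat) (arr aux : List Char) (i : Nat) (j : Int) : List Char :=
  match fuel with
  | 0 => aux
  | fuel + 1 =>
    if arr.length > i ∧ (i : Int) ≠ j then
      if arr.getD i ' ' ≠ ' ' then pvLoop2A fuel arr (aux ++ [arr.getD i ' ']) (i + 1) j
      else if arr.length = i + 1 then pvLoop2A fuel arr aux (i + 1) ((i : Int) + 1)
      else if PySem.Chars.isalpha (arr.getD (i + 1) ' ') then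
        pvLoop2A fuel arr (aux ++ [arr.getD i ' ']) (i + 1) j
      else pvLoop2A fuel arr aux (i + 1) ((i : Int) + 1)
    else aux

def drop_white_space_around (s : String) : String :=
  let arr := s.toList
  let (aux, i) := pvLoop1A (arr.length + 1) arr [] 0 arr.length
  String.ofList (pvLoop2A (arr.length + 1) arr aux i (-1))

-- ===== PORT B =====
-- the cut-index scan: for i in range(1, len t): if t[i]==' ' and not (i+1<len t and t[i+1].isalpha()): return t[:i]
def pvCutB (fuel : Nat) (t : List Char) (i : Nat) : List Char :=
  match fuel with
  | 0 => t
  | fuel + 1 =>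
    if i < t.length then
      if t.getD i ' ' = ' ' ∧ ¬ (i + 1 < t.length ∧ PySem.Chars.isalpha (t.getD (i + 1) ' ')) then
        t.take i
      else pvCutB fuel t (i + 1)
    else t

def drop_white_space_around_alt (s : String) : String :=
  let t := s.toList.dropWhile (· == ' ')   -- lstrip(' '): drop only literal leading spaces
  if t = [] then ""
  else String.ofList (pvCutB t.length t 1)

-- ===== PRECONDITION & SPEC =====
def Spec_drop_white_space_around (s : String) (out : String) : Prop := out = drop_white_space_around_alt s
instance (s : String) (out : String) : Decidable (Spec_drop_white_space_around s out) := by unfold Spec_drop_white_space_around; infer_instance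

-- ===== CLAIM (what is proved, stated in full; the proofs are below) =====
def Claim_equal_drop_white_space_around : Prop := ∀ (s : String), Dom_drop_white_space_around s → Spec_drop_white_space_around s (drop_white_space_around s)

-- ===== LEMMAS AND PROOFS =====

-- the common semantics of the tail of both programs: keep chars, stop at a space
-- not followed by a letter (dropping it), keep a space followed by a letter
def pvScan : List Char → List Char
  | [] => []
  | c :: rest =>
    if c ≠ ' ' then c :: pvScan rest
    else match rest with
      | [] => []
      | d :: _ => if PySem.Chars.isalpha d then c :: pvScan rest else []

theorem pvLoop1A_self (fuel : Nat) (arr aux : List Char) (i : Nat) :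
    pvLoop1A fuel arr aux i i = (aux, i) := by
  cases fuel <;> simp [pvLoop1A]

theorem pvLoop1A_spec (fuel : Nat) : ∀ (arr : List Char) (i : Nat),
    i ≤ arr.length → arr.length - i < fuel →
    pvLoop1A fuel arr [] i arr.length =
      (match (arr.drop i).dropWhile (· == ' ') with
       | [] => ([], arr.length)
       | _ :: rest => ([(arr.drop i).dropWhile (· == ' ') |>.headD ' '], arr.length - rest.length)) := by
  induction fuel with
  | zero => intro arr i _ h; omega
  | succ fuel ih =>
    intro arr i hi hf
    rcases Nat.lt_or_ge i arr.length with hlt | hge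
    · have hne : i ≠ arr.length := by omega
      have hdrop : arr.drop i = arr[i] :: arr.drop (i + 1) := List.drop_eq_getElem_cons hlt
      have hget : arr.getD i ' ' = arr[i] := by simp [List.getD, hlt]
      by_cases hsp : arr[i] = ' '
      · have hstep : pvLoop1A (fuel + 1) arr [] i arr.length
            = pvLoop1A fuel arr [] (i + 1) arr.length := by
          simp only [pvLoop1A]
          rw [if_pos hne, if_pos (by rw [hget]; exact hsp)]
        rw [hstep, ih arr (i + 1) hlt (by omega), hdrop]
        simp [List.dropWhile, hsp]
      · have hstep : pvLoop1A (fuel + 1) arr [] i arr.length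
            = pvLoop1A fuel arr [arr[i]] (i + 1) (i + 1) := by
          simp only [pvLoop1A]
          rw [if_pos hne, if_neg (by rw [hget]; exact hsp)]
          rw [hget]
          simp only [List.nil_append]
        rw [hstep, pvLoop1A_self, hdrop]
        have hdw : (arr[i] :: arr.drop (i + 1)).dropWhile (· == ' ')
            = arr[i] :: arr.drop (i + 1) := by
          rw [List.dropWhile_cons_of_neg]; simp [hsp]
        rw [hdw]
        simp only [List.headD_cons, List.length_drop, Prod.mk.injEq]
        exact ⟨trivial, by omega⟩
    · have hieq : i = arr.length := by omega
      subst hieq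
      rw [pvLoop1A_self]
      simp

theorem pvLoop2A_stopped (fuel : Nat) (arr aux : List Char) (i : Nat) :
    pvLoop2A fuel arr aux (i + 1) ((i : Int) + 1) = aux := by
  cases fuel with
  | zero => simp [pvLoop2A]
  | succ fuel =>
    simp only [pvLoop2A]
    rw [if_neg]
    push_neg
    intro _
    push_cast
    ring

theorem pvLoop2A_spec (fuel : Nat) : ∀ (arr aux : List Char) (i : Nat),
    arr.length - i < fuel →
    pvLoop2A fuel arr aux i (-1) = aux ++ pvScan (arr.drop i) := by
  induction fuel with
  | zero => intro arr aux i h; omega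
  | succ fuel ih =>
    intro arr aux i hf
    rcases Nat.lt_or_ge i arr.length with hlt | hge
    · have hdrop : arr.drop i = arr[i] :: arr.drop (i + 1) := List.drop_eq_getElem_cons hlt
      have hget : arr.getD i ' ' = arr[i] := by simp [List.getD, hlt]
      have hcond : (arr.length > i ∧ (i : Int) ≠ (-1)) := ⟨hlt, by omega⟩
      by_cases hsp : arr[i] = ' '
      · by_cases hlast : arr.length = i + 1
        · have hstep : pvLoop2A (fuel + 1) arr aux i (-1)
              = pvLoop2A fuel arr aux (i + 1) ((i : Int) + 1) := by
            simp only [pvLoop2A]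
            rw [if_pos hcond, if_neg (by rw [hget]; simp [hsp]), if_pos hlast]
          have hnil : arr.drop (i + 1) = [] := by
            apply List.drop_eq_nil_of_le; omega
          rw [hstep, pvLoop2A_stopped, hdrop]
          simp [pvScan, hsp, hnil]
        · have hlt2 : i + 1 < arr.length := by omega
          have hdrop2 : arr.drop (i + 1) = arr[i + 1] :: arr.drop (i + 2) :=
            List.drop_eq_getElem_cons hlt2
          have hget2 : arr.getD (i + 1) ' ' = arr[i + 1] := by simp [List.getD, hlt2]
          by_cases hal : PySem.Chars.isalpha arr[i + 1] = true
          · have hstep : pvLoop2A (fuel + 1) arr aux i (-1)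
                = pvLoop2A fuel arr (aux ++ [arr[i]]) (i + 1) (-1) := by
              simp only [pvLoop2A]
              rw [if_pos hcond, if_neg (by rw [hget]; simp [hsp]), if_neg hlast,
                  if_pos (by rw [hget2]; exact hal)]
              rw [hget]
            rw [hstep, ih arr (aux ++ [arr[i]]) (i + 1) (by omega), hdrop, hdrop2]
            simp [pvScan, hsp, hal]
          · have hstep : pvLoop2A (fuel + 1) arr aux i (-1)
                = pvLoop2A fuel arr aux (i + 1) ((i : Int) + 1) := by
              simp only [pvLoop2A]
              rw [if_pos hcond, if_neg (by rw [hget]; simp [hsp]), if_neg hlast,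
                  if_neg (by rw [hget2]; exact hal)]
            rw [hstep, pvLoop2A_stopped, hdrop, hdrop2]
            simp [pvScan, hsp, hal]
      · have hstep : pvLoop2A (fuel + 1) arr aux i (-1)
            = pvLoop2A fuel arr (aux ++ [arr[i]]) (i + 1) (-1) := by
          simp only [pvLoop2A]
          rw [if_pos hcond, if_pos (by rw [hget]; exact hsp)]
          rw [hget]
        rw [hstep, ih arr (aux ++ [arr[i]]) (i + 1) (by omega), hdrop]
        simp [pvScan, hsp]
    · have hnil : arr.drop i = [] := List.drop_eq_nil_of_le hge
      have hret : pvLoop2A (fuel + 1) arr aux i (-1) = aux := by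
        simp only [pvLoop2A]
        rw [if_neg (by push_neg; intro h; omega)]
      rw [hret, hnil]; simp [pvScan]

theorem pvCutB_spec (fuel : Nat) : ∀ (t : List Char) (i : Nat),
    t.length - i < fuel →
    pvCutB fuel t i = t.take i ++ pvScan (t.drop i) := by
  induction fuel with
  | zero => intro t i h; omega
  | succ fuel ih =>
    intro t i hf
    rcases Nat.lt_or_ge i t.length with hlt | hge
    · have hdrop : t.drop i = t[i] :: t.drop (i + 1) := List.drop_eq_getElem_cons hlt
      have hget : t.getD i ' ' = t[i] := by simp [List.getD, hlt]
      have htake : t.take (i + 1) = t.take i ++ [t[i]] := by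
        rw [List.take_succ]; simp [List.getElem?_eq_getElem hlt]
      by_cases hsp : t[i] = ' '
      · by_cases hnext : i + 1 < t.length ∧ PySem.Chars.isalpha (t.getD (i + 1) ' ') = true
        · obtain ⟨hlt2, hal⟩ := hnext
          have hdrop2 : t.drop (i + 1) = t[i + 1] :: t.drop (i + 2) :=
            List.drop_eq_getElem_cons hlt2
          have hget2 : t.getD (i + 1) ' ' = t[i + 1] := by simp [List.getD, hlt2]
          rw [hget2] at hal
          have hstep : pvCutB (fuel + 1) t i = pvCutB fuel t (i + 1) := by
            simp only [pvCutB]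
            rw [if_pos hlt, if_neg (by push_neg; intro _; exact ⟨hlt2, by rw [hget2]; exact hal⟩)]
          rw [hstep, ih t (i + 1) (by omega), hdrop, hdrop2, htake, List.append_assoc]
          simp [pvScan, hsp, hal]
        · have hstop : pvCutB (fuel + 1) t i = t.take i := by
            simp only [pvCutB]
            rw [if_pos hlt, if_pos ⟨by rw [hget]; exact hsp, hnext⟩]
          rw [hstop, hdrop]
          rcases Nat.lt_or_ge (i + 1) t.length with hlt2 | hge2
          · have hdrop2 : t.drop (i + 1) = t[i + 1] :: t.drop (i + 2) :=
              List.drop_eq_getElem_cons hlt2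
            have hget2 : t.getD (i + 1) ' ' = t[i + 1] := by simp [List.getD, hlt2]
            have hal : ¬ PySem.Chars.isalpha t[i + 1] = true := by
              intro h; exact hnext ⟨hlt2, by rw [hget2]; exact h⟩
            rw [hdrop2]; simp [pvScan, hsp, hal]
          · have hnil : t.drop (i + 1) = [] := List.drop_eq_nil_of_le hge2
            rw [hnil]; simp [pvScan, hsp]
      · have hstep : pvCutB (fuel + 1) t i = pvCutB fuel t (i + 1) := by
          simp only [pvCutB]
          rw [if_pos hlt, if_neg (by push_neg; intro h; exact absurd (by rw [hget] at h; exact h) hsp)]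
        rw [hstep, ih t (i + 1) (by omega), hdrop, htake, List.append_assoc]
        simp [pvScan, hsp]
    · have hnil : t.drop i = [] := List.drop_eq_nil_of_le hge
      have hret : pvCutB (fuel + 1) t i = t := by
        simp only [pvCutB]
        rw [if_neg (by omega)]
      rw [hret, hnil]
      simp [pvScan, List.take_of_length_le hge]

-- the dropWhile suffix of arr is arr.drop (arr.length - (dropWhile …).length)
theorem pv_dropWhile_eq_drop (arr : List Char) :
    arr.dropWhile (· == ' ') = arr.drop (arr.length - (arr.dropWhile (· == ' ')).length) := by
  induction arr with
  | nil => simp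
  | cons a l ih =>
    by_cases hp : (a == ' ') = true
    · have hd : List.dropWhile (· == ' ') (a :: l) = List.dropWhile (· == ' ') l := by
        simp [List.dropWhile_cons, hp]
      have hle : (l.dropWhile (· == ' ')).length ≤ l.length := List.length_dropWhile_le _ _
      rw [hd, List.length_cons]
      have h1 : l.length + 1 - (l.dropWhile (· == ' ')).length
          = (l.length - (l.dropWhile (· == ' ')).length) + 1 := by omega
      rw [h1, List.drop_succ_cons]
      exact ih
    · have hd : List.dropWhile (· == ' ') (a :: l) = a :: l := by
        simp [List.dropWhile_cons, hp]
      rw [hd]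
      simp

theorem drop_white_space_around_eq (s : String) :
    drop_white_space_around s = drop_white_space_around_alt s := by
  unfold drop_white_space_around drop_white_space_around_alt
  have hL1 := pvLoop1A_spec (s.toList.length + 1) s.toList 0 (by omega) (by omega)
  rw [List.drop_zero] at hL1
  cases ht : s.toList.dropWhile (· == ' ') with
  | nil =>
    rw [ht] at hL1
    simp only [hL1]
    rw [pvLoop2A_spec (s.toList.length + 1) s.toList [] s.toList.length (by omega)]
    simp [ht, pvScan, List.drop_eq_nil_of_le]
  | cons c rest =>
    rw [ht] at hL1
    simp only [hL1, List.headD_cons]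
    have hlen : rest.length + 1 ≤ s.toList.length := by
      have := List.length_dropWhile_le (p := (· == ' ')) (l := s.toList)
      rw [ht] at this; simpa using this
    have hdropeq : s.toList.drop (s.toList.length - rest.length) = rest := by
      have h0 := pv_dropWhile_eq_drop s.toList
      rw [ht] at h0
      have h1 : s.toList.length - (c :: rest).length = s.toList.length - rest.length - 1 := by
        simp; omega
      rw [h1] at h0
      have h2 : s.toList.drop (s.toList.length - rest.length)
          = (s.toList.drop (s.toList.length - rest.length - 1)).drop 1 := by
        rw [List.drop_drop]
        congr 1
        omega
      rw [h2, ← h0]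
      simp
    rw [pvLoop2A_spec (s.toList.length + 1) s.toList [c] (s.toList.length - rest.length) (by omega)]
    rw [hdropeq]
    rw [if_neg (by simp)]
    rw [pvCutB_spec (c :: rest).length (c :: rest) 1 (by simp)]
    rfl

-- ===== VERDICT (by name: the statement is the Claim_ definition above) =====
theorem drop_white_space_around_spec : Claim_equal_drop_white_space_around := by
  intro s _
  unfold Spec_drop_white_space_around
  exact drop_white_space_around_eq s
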